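-- pv_equiv track=rewrite | github.com/krisstallenberg/srl-with-logistic-regression | feature_extraction/extract_morph_features_prev_token.py | previous_token_morph_features
-- ===== SOURCE A (Python) =====
-- def previous_token_morph_features(sentence):
--     """
--     Extracts the provided 'features' column of the previous token for each token in the sentence
--
--     Returns a list of dictionaries representing the features of the previous token, , else a placeholder '_' is added
--     """
--     features = []
--     for i, token_info in enumerate(sentence):
--         if i == 0:
--             features.append('_')  #placeholder for the 1st token
--         else:
--             previous_token_features = sentence[i - 1]['features']
--             features.append(previous_token_features)
--     return features
-- ===== SOURCE B (Python) =====
-- def previous_token_morph_features(sentence):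
--     """
--     Extracts the provided 'features' column of the previous token for each token in the sentence
--
--     Recursive carry-forward: walk the sentence carrying the previous token;
--     for each token emit the carried token's 'features' ('_' when there is none).
--     """
--     def go(prev, rest):
--         if not rest:
--             return []
--         feat = '_' if prev is None else prev['features']
--         return [feat] + go(rest[0], rest[1:])
--     return go(None, sentence)
-- ===== Notes on version B (the rewrite author's own statement) =====
-- stated objective: alternative
-- what changed: Replaces the index-based enumerate loop with its i==0 branch and sentence[i-1] back-reference by structural recursion carrying the previous token as state: each step emits the carried token's 'features' ('_' initially) and recurses with the current token as the new carry, so no indices or back-references exist at all.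
import Mathlib
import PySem

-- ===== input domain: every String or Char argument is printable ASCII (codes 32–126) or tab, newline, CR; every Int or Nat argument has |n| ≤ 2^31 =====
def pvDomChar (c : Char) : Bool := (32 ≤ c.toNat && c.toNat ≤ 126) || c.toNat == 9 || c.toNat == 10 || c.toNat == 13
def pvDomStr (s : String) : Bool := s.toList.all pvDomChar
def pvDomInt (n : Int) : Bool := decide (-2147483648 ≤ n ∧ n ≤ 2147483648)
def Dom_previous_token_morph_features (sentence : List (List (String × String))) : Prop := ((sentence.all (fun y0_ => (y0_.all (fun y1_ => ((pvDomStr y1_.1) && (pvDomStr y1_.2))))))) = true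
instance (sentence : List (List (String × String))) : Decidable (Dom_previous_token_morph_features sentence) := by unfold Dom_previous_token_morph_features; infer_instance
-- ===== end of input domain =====

-- B replaces A's index-based loop (i==0 branch + sentence[i-1] back-reference) by structural
-- recursion carrying the previous token as state; objective: alternative decomposition, same cost.


-- ===== PORT A =====
-- one loop step: i == 0 appends '_', else looks up sentence[i-1]['features'];
-- the Option accumulator is none exactly where the Python raises (IndexError/KeyError)
def pvStepA (sentence : List (List (String × String))) (acc : Option (List String))
    (p : Int × List (String × String)) : Option (List String) :=
  match acc with
  | none => none
  | some fs =>
    if p.1 = 0 then some (fs ++ ["_"])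
    else
      match PySem.List.pyGet? sentence (p.1 - 1) with
      | none => none
      | some prev =>
        match (PySem.Dict.mk prev).get? "features" with
        | none => none
        | some v => some (fs ++ [v])

def previous_token_morph_features (sentence : List (List (String × String))) : List String :=
  ((PySem.List.enumerate sentence).foldl (pvStepA sentence) (some [])).getD []

-- ===== PORT B =====
-- recursion carrying the previous token; none result = the Python's KeyError
def pvGoB : Option (List (String × String)) → List (List (String × String)) → Option (List String)
  | _, [] => some []
  | prev, t :: rest =>
    match (match prev with
           | none => some "_"
           | some p => (PySem.Dict.mk p).get? "features") with
    | none => none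
    | some f => (pvGoB (some t) rest).map (fun tl => f :: tl)

def previous_token_morph_features_alt (sentence : List (List (String × String))) : List String :=
  (pvGoB none sentence).getD []

-- ===== PRECONDITION & SPEC =====
-- Pre_ excludes exactly the inputs where A raises KeyError: a non-last token without a 'features' key.
def Pre_previous_token_morph_features (sentence : List (List (String × String))) : Prop :=
  ∀ t ∈ sentence.dropLast, ((PySem.Dict.mk t).get? "features").isSome = true
instance (sentence : List (List (String × String))) : Decidable (Pre_previous_token_morph_features sentence) := by unfold Pre_previous_token_morph_features; infer_instance

def pvWitness_previous_token_morph_features : (List (List (String × String))) :=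
  [[("features", "a=b")], [("features", "c=d")], [("pos", "N")]]

def Spec_previous_token_morph_features (sentence : List (List (String × String))) (out : List String) : Prop := out = previous_token_morph_features_alt sentence
instance (sentence : List (List (String × String))) (out : List String) : Decidable (Spec_previous_token_morph_features sentence out) := by unfold Spec_previous_token_morph_features; infer_instance

-- ===== CLAIM (what is proved, stated in full; the proofs are below) =====
def Claim_equal_previous_token_morph_features : Prop := ∀ (sentence : List (List (String × String))), Dom_previous_token_morph_features sentence → Pre_previous_token_morph_features sentence → Spec_previous_token_morph_features sentence (previous_token_morph_features sentence)

-- ===== LEMMAS AND PROOFS =====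

-- the 'features' value of a token that has one (used only to state the loop invariants)
def pvFeat (t : List (String × String)) : String :=
  (((PySem.Dict.mk t).get? "features").getD "_")

-- A's loop over the tail: with start index k ≥ 1 and prev = sentence[k-1], the fold
-- appends the 'features' of the predecessor of each element of s, i.e. of (prev :: s).dropLast.
lemma pvLoopA (full : List (List (String × String))) :
    ∀ (s : List (List (String × String))) (k : Nat) (prev : List (String × String))
      (acc : List String),
      1 ≤ k →
      PySem.List.pyGet? full ((k : Int) - 1) = some prev →
      full.drop k = s →
      (∀ t ∈ (prev :: s).dropLast, ((PySem.Dict.mk t).get? "features").isSome = true) →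
      (PySem.List.enumerate s (k : Int)).foldl (pvStepA full) (some acc)
        = some (acc ++ ((prev :: s).dropLast).map pvFeat) := by
  intro s
  induction s with
  | nil => intro k prev acc _ _ _ _; simp [PySem.List.enumerate_nil]
  | cons t rest ih =>
    intro k prev acc hk hprev hdrop hpre
    have hfeat : ((PySem.Dict.mk prev).get? "features").isSome = true := by
      exact hpre prev (by simp)
    obtain ⟨v, hv⟩ := Option.isSome_iff_exists.mp hfeat
    have hkne : ((k : Int)) ≠ 0 := by exact_mod_cast Nat.one_le_iff_ne_zero.mp hk
    have hstep : pvStepA full (some acc) ((k : Int), t) = some (acc ++ [v]) := by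
      simp [pvStepA, hprev, hv]
      intro h
      omega
    have ht : PySem.List.pyGet? full (((k + 1 : Nat) : Int) - 1) = some t := by
      have hget : full[k]? = some t := by
        have := congrArg (fun l => l.head?) hdrop
        simpa [List.head?_drop] using this
      have hc : ((k + 1 : Nat) : Int) - 1 = ((k : Nat) : Int) := by push_cast; ring
      rw [hc, PySem.List.pyGet?_natCast]
      exact hget
    have hdrop' : full.drop (k + 1) = rest := by
      rw [← List.tail_drop, hdrop]
      rfl
    rw [PySem.List.enumerate_cons, List.foldl_cons, hstep]
    have hcast : ((k : Int) + 1) = ((k + 1 : Nat) : Int) := by push_cast; ring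
    rw [hcast, ih (k + 1) t (acc ++ [v]) (by omega) ht hdrop' (by
      intro x hx
      apply hpre
      cases rest with
      | nil => simp at hx
      | cons u us => simpa using Or.inr (by simpa using hx))]
    cases rest with
    | nil => simp [pvFeat, hv]
    | cons u us => simp [pvFeat, hv]

-- B's recursion with a carried token p computes the 'features' of each predecessor in (p :: s)
lemma pvGoB_some :
    ∀ (s : List (List (String × String))) (p : List (String × String)),
      (∀ t ∈ (p :: s).dropLast, ((PySem.Dict.mk t).get? "features").isSome = true) →
      pvGoB (some p) s = some (((p :: s).dropLast).map pvFeat) := by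
  intro s
  induction s with
  | nil => intro p _; simp [pvGoB]
  | cons t rest ih =>
    intro p hpre
    obtain ⟨v, hv⟩ := Option.isSome_iff_exists.mp (hpre p (by simp))
    have hrest : ∀ x ∈ (t :: rest).dropLast, ((PySem.Dict.mk x).get? "features").isSome = true := by
      intro x hx
      apply hpre
      cases rest with
      | nil => simp at hx
      | cons u us => simpa using Or.inr (by simpa using hx)
    rw [pvGoB, hv, ih t hrest]
    cases rest with
    | nil => simp [pvFeat, hv]
    | cons u us => simp [pvFeat, hv]

-- ===== VERDICT (by name: the statement is the Claim_ definition above) =====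
theorem previous_token_morph_features_spec : Claim_equal_previous_token_morph_features := by
  intro sentence _ hpre
  unfold Spec_previous_token_morph_features
  cases sentence with
  | nil => rfl
  | cons x xs =>
    unfold previous_token_morph_features previous_token_morph_features_alt
    rw [PySem.List.enumerate_cons, List.foldl_cons]
    have h0 : pvStepA (x :: xs) (some []) ((0 : Int), x) = some ["_"] := by
      simp [pvStepA]
    have hx : PySem.List.pyGet? (x :: xs) (((1 : Nat) : Int) - 1) = some x := by
      simp
    have hA := pvLoopA (x :: xs) xs 1 x ["_"] (by omega) hx (by simp) hpre
    rw [h0, show ((0 : Int) + 1) = ((1 : Nat) : Int) by norm_num, hA]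
    rw [pvGoB, pvGoB_some xs x hpre]
    simp
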